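-- pv_equiv track=rewrite | github.com/adnanaq/echora | src/enrichment/programmatic/assembly.py | _apply_schema_ordering
-- ===== SOURCE A (Python) =====
-- from typing import Any
--
-- SCALAR_FIELDS = [
--     "background",
--     "episodes",
--     "month",
--     "nsfw",
--     "picture",
--     "rating",
--     "source_material",
--     "status",
--     "synopsis",
--     "thumbnail",
--     "title",
--     "title_english",
--     "title_japanese",
--     "type",
-- ]
--
-- ARRAY_FIELDS = [
--     "awards",
--     "characters",
--     "content_warnings",
--     "demographics",
--     "ending_themes",
--     "episode_details",
--     "genres",
--     "licensors",
--     "opening_themes",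
--     "related_anime",
--     "relations",
--     "sources",
--     "streaming_info",
--     "synonyms",
--     "tags",
--     "themes",
--     "trailers",
-- ]
--
-- OBJECT_FIELDS = [
--     "aired_dates",
--     "anime_season",
--     "broadcast",
--     "broadcast_schedule",
--     "delay_information",
--     "duration",
--     "external_links",
--     "producers",
--     "score",
--     "statistics",
--     "studios",
-- ]
--
-- def _apply_schema_ordering(entry: dict[str, Any]) -> dict[str, Any]:
--     """Apply AnimeEntry schema field ordering: SCALAR → ARRAY → OBJECT → enrichment_metadata"""
--
--     # Build ordered entry
--     ordered_entry = {}
--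
--     # 1. SCALAR FIELDS (alphabetical)
--     for field in SCALAR_FIELDS:
--         if field in entry:
--             ordered_entry[field] = entry[field]
--
--     # 2. ARRAY FIELDS (alphabetical)
--     for field in ARRAY_FIELDS:
--         if field in entry:
--             ordered_entry[field] = entry[field]
--
--     # 3. OBJECT/DICT FIELDS (alphabetical)
--     for field in OBJECT_FIELDS:
--         if field in entry:
--             ordered_entry[field] = entry[field]
--
--     # 4. FINAL FIELD: enrichment_metadata (always last)
--     if "enrichment_metadata" in entry:
--         ordered_entry["enrichment_metadata"] = entry["enrichment_metadata"]
--
--     return ordered_entry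
-- ===== SOURCE B (Python) =====
-- """Schema reordering via a precomputed rank table: filter entry's items and
-- sort them by rank instead of scanning the three schema lists."""
--
-- SCALAR_FIELDS = [
--     "background", "episodes", "month", "nsfw", "picture", "rating",
--     "source_material", "status", "synopsis", "thumbnail", "title",
--     "title_english", "title_japanese", "type",
-- ]
--
-- ARRAY_FIELDS = [
--     "awards", "characters", "content_warnings", "demographics",
--     "ending_themes", "episode_details", "genres", "licensors",
--     "opening_themes", "related_anime", "relations", "sources",
--     "streaming_info", "synonyms", "tags", "themes", "trailers",
-- ]
--
-- OBJECT_FIELDS = [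
--     "aired_dates", "anime_season", "broadcast", "broadcast_schedule",
--     "delay_information", "duration", "external_links", "producers",
--     "score", "statistics", "studios",
-- ]
--
-- ORDER_INDEX = {
--     f: i
--     for i, f in enumerate(
--         SCALAR_FIELDS + ARRAY_FIELDS + OBJECT_FIELDS + ["enrichment_metadata"]
--     )
-- }
--
--
-- def _apply_schema_ordering(entry):
--     kept = [kv for kv in entry.items() if kv[0] in ORDER_INDEX]
--     kept.sort(key=lambda kv: ORDER_INDEX[kv[0]])
--     return dict(kept)
-- ===== Notes on version B (the rewrite author's own statement) =====
-- stated objective: idiomatic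
-- what changed: Instead of three membership passes over the fixed schema lists, B precomputes a field->rank table once and does a single filter-then-sort over the entry's own items.
import Mathlib
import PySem

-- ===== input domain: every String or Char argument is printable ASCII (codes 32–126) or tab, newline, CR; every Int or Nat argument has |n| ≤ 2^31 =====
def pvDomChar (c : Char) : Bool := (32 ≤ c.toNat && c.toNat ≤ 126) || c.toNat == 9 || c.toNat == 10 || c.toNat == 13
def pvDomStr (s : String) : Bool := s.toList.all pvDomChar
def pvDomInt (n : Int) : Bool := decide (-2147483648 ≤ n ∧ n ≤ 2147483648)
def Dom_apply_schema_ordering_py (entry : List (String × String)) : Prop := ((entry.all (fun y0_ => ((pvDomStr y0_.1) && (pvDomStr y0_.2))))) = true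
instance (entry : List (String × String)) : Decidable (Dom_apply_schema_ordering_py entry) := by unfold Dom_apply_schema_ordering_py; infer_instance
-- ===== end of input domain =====

-- B changes the algorithm: one filter over the entry's own items sorted by a precomputed field→rank table,
-- instead of A's three membership passes over the fixed schema lists (idiomatic; return value only).

def SCALAR_FIELDS : List String :=
  ["background", "episodes", "month", "nsfw", "picture", "rating",
   "source_material", "status", "synopsis", "thumbnail", "title",
   "title_english", "title_japanese", "type"]

def ARRAY_FIELDS : List String :=
  ["awards", "characters", "content_warnings", "demographics",
   "ending_themes", "episode_details", "genres", "licensors",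
   "opening_themes", "related_anime", "relations", "sources",
   "streaming_info", "synonyms", "tags", "themes", "trailers"]

def OBJECT_FIELDS : List String :=
  ["aired_dates", "anime_season", "broadcast", "broadcast_schedule",
   "delay_information", "duration", "external_links", "producers",
   "score", "statistics", "studios"]

set_option maxRecDepth 8000

-- ===== PORT A =====
-- 'if field in entry: ordered[field] = entry[field]' — the guarded lookup is get?; some v exactly when 'field in entry'
def pvStepA (d : PySem.Dict String String) (o : PySem.Dict String String) (f : String) : PySem.Dict String String :=
  match d.get? f with
  | some v => o.insert f v
  | none => o

def apply_schema_ordering_py (entry : List (String × String)) : List (String × String) :=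
  let d : PySem.Dict String String := PySem.Dict.mk entry
  let o0 : PySem.Dict String String := PySem.Dict.empty
  let o1 := SCALAR_FIELDS.foldl (pvStepA d) o0
  let o2 := ARRAY_FIELDS.foldl (pvStepA d) o1
  let o3 := OBJECT_FIELDS.foldl (pvStepA d) o2
  let o4 := pvStepA d o3 "enrichment_metadata"
  o4.items

-- ===== PORT B =====
def ORDER_INDEX : PySem.Dict String Int :=
  PySem.Dict.ofList
    ((PySem.List.enumerate (SCALAR_FIELDS ++ ARRAY_FIELDS ++ OBJECT_FIELDS ++ ["enrichment_metadata"])).map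
      (fun p => (p.2, p.1)))

def apply_schema_ordering_py_alt (entry : List (String × String)) : List (String × String) :=
  let kept := entry.filter (fun kv => ORDER_INDEX.contains kv.1)
  -- every kept key is in ORDER_INDEX, so Python's ORDER_INDEX[kv[0]] never raises; getD is exact here
  let sortedKept := PySem.List.sorted kept (fun kv => ORDER_INDEX.getD kv.1 0) false
  (PySem.Dict.ofList sortedKept).items

-- ===== PRECONDITION & SPEC =====
-- Pre_ excludes association lists with duplicate keys: they cannot arise from a Python dict argument,
-- so A returns on every dict input; this excludes nothing of A's Python domain.
def Pre_apply_schema_ordering_py (entry : List (String × String)) : Prop :=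
  (entry.map Prod.fst).Nodup
instance (entry : List (String × String)) : Decidable (Pre_apply_schema_ordering_py entry) := by
  unfold Pre_apply_schema_ordering_py; infer_instance

def pvWitness_apply_schema_ordering_py : (List (String × String)) :=
  [("title", "Cowboy Bebop"), ("genres", "action"), ("enrichment_metadata", "m"), ("junk", "z")]

def Spec_apply_schema_ordering_py (entry : List (String × String)) (out : List (String × String)) : Prop := out = apply_schema_ordering_py_alt entry
instance (entry : List (String × String)) (out : List (String × String)) : Decidable (Spec_apply_schema_ordering_py entry out) := by unfold Spec_apply_schema_ordering_py; infer_instance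

-- ===== CLAIM (what is proved, stated in full; the proofs are below) =====
def Claim_equal_apply_schema_ordering_py : Prop := ∀ (entry : List (String × String)), Dom_apply_schema_ordering_py entry → Pre_apply_schema_ordering_py entry → Spec_apply_schema_ordering_py entry (apply_schema_ordering_py entry)

-- ===== LEMMAS AND PROOFS =====

def pvALL : List String := SCALAR_FIELDS ++ ARRAY_FIELDS ++ OBJECT_FIELDS ++ ["enrichment_metadata"]

def pvGather (d : PySem.Dict String String) (L : List String) : List (String × String) :=
  L.filterMap (fun f => (d.get? f).map (fun v => (f, v)))


lemma pvA_fold_items (d : PySem.Dict String String) (L : List String) (o : PySem.Dict String String)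
    (hfresh : ∀ f ∈ L, o.contains f = false) (hnd : L.Nodup) :
    (L.foldl (pvStepA d) o).items = o.items ++ pvGather d L := by
  induction L generalizing o with
  | nil => simp [pvGather]
  | cons f t ih =>
    rcases List.nodup_cons.mp hnd with ⟨hft, hnt⟩
    have hof : o.contains f = false := hfresh f (List.mem_cons_self ..)
    cases hg : d.get? f with
    | none =>
      have := ih o (fun x hx => hfresh x (List.mem_cons_of_mem _ hx)) hnt
      simp [List.foldl_cons, pvStepA, hg, this, pvGather]
    | some v =>
      have hfresh' : ∀ x ∈ t, (o.insert f v).contains x = false := by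
        intro x hx
        rw [PySem.Dict.contains_insert]
        have hxf : x ≠ f := fun h => hft (h ▸ hx)
        simp [hxf, hfresh x (List.mem_cons_of_mem _ hx)]
      have hstep : pvStepA d o f = o.insert f v := by simp [pvStepA, hg]
      rw [List.foldl_cons, hstep, ih _ hfresh' hnt,
        PySem.Dict.items_insert_of_not_contains o v hof]
      simp [pvGather, hg]

lemma pvSwap (L : List String) (hL : L.Nodup) (k : String) (v : String × String)
    (g g' : String → Option (String × String))
    (hk : k ∈ L) (hgk : g k = none) (hg'k : g' k = some v)
    (hne : ∀ f, f ≠ k → g' f = g f) :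
    (L.filterMap g').Perm (v :: L.filterMap g) := by
  induction L with
  | nil => cases hk
  | cons x t ih =>
    rcases List.nodup_cons.mp hL with ⟨hxt, hnt⟩
    by_cases hxk : x = k
    · subst hxk
      have hcong : t.filterMap g' = t.filterMap g := by
        apply List.filterMap_congr
        intro f hf
        exact hne f (fun h => hxt (h ▸ hf))
      simp [hg'k, hgk, hcong]
    · have hkt : k ∈ t := by
        rcases List.mem_cons.mp hk with h | h
        · exact absurd h.symm hxk
        · exact h
      have hgx : g' x = g x := hne x hxk
      have hperm := ih hnt hkt
      cases hgw : g x with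
      | none => simpa [List.filterMap_cons, hgx, hgw] using hperm
      | some w =>
        simp only [List.filterMap_cons, hgx, hgw]
        exact (hperm.cons w).trans (List.Perm.swap v w _)

lemma pvPerm (entry : List (String × String)) (hn : (entry.map Prod.fst).Nodup)
    (L : List String) (hL : L.Nodup) :
    (pvGather (PySem.Dict.mk entry) L).Perm
      (entry.filter (fun p => decide (p.1 ∈ L))) := by
  induction entry with
  | nil =>
    simp only [pvGather]
    have : ∀ f ∈ L, ((PySem.Dict.mk ([] : List (String × String))).get? f).map
        (fun v => (f, v)) = none := by intro f _; rfl
    rw [List.filterMap_congr this]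
    simp
  | cons p rest ih =>
    obtain ⟨k, v⟩ := p
    simp only [List.map_cons, List.nodup_cons] at hn
    obtain ⟨hkrest, hnrest⟩ := hn
    have hgetcons : ∀ f, (PySem.Dict.mk ((k, v) :: rest)).get? f =
        if k == f then some v else (PySem.Dict.mk rest).get? f := by
      intro f; exact PySem.Dict.get?_mk_cons ..
    have hgrestk : (PySem.Dict.mk rest).get? k = none := by
      rw [PySem.Dict.get?_eq_none_iff_not_mem_keys]
      simpa [PySem.Dict.keys] using hkrest
    by_cases hkL : k ∈ L
    · have hsw := pvSwap L hL k (k, v)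
        (fun f => ((PySem.Dict.mk rest).get? f).map (fun w => (f, w)))
        (fun f => ((PySem.Dict.mk ((k, v) :: rest)).get? f).map (fun w => (f, w)))
        hkL (by simp [hgrestk]) (by simp [hgetcons]) ?_
      · refine (hsw.trans ?_)
        simp only [List.filter_cons, hkL, decide_true]
        exact (ih hnrest).cons (k, v)
      · intro f hf
        have : (k == f) = false := beq_eq_false_iff_ne.mpr (Ne.symm hf)
        simp [hgetcons, this]
    · have hcong : pvGather (PySem.Dict.mk ((k, v) :: rest)) L
          = pvGather (PySem.Dict.mk rest) L := by
        apply List.filterMap_congr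
        intro f hf
        have : (k == f) = false :=
          beq_eq_false_iff_ne.mpr (Ne.symm (fun h => hkL (h ▸ hf)))
        simp [hgetcons, this]
      rw [hcong]
      simp only [List.filter_cons]
      have : decide (k ∈ L) = false := by simpa using hkL
      simp only [this, Bool.false_eq_true, ite_false]
      exact ih hnrest

lemma pvRankMap : pvALL.map (fun f => ORDER_INDEX.getD f 0) =
    [0, 1, 2, 3, 4, 5, 6, 7, 8, 9, 10, 11, 12, 13, 14, 15, 16, 17, 18, 19, 20, 21, 22, 23, 24, 25, 26, 27, 28, 29, 30, 31, 32, 33, 34, 35, 36, 37, 38, 39, 40, 41, 42] := by decide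

lemma pvALL_pairwise : pvALL.Pairwise
    (fun a b => ORDER_INDEX.getD a 0 < ORDER_INDEX.getD b 0) := by
  have h : (pvALL.map (fun f => ORDER_INDEX.getD f 0)).Pairwise
      (fun a b => a < b) := by rw [pvRankMap]; decide
  exact (List.pairwise_map.mp h)

lemma pvPairwise (d : PySem.Dict String String) :
    (pvGather d pvALL).Pairwise
      (fun a b => ORDER_INDEX.getD a.1 0 < ORDER_INDEX.getD b.1 0) := by
  unfold pvGather
  rw [List.pairwise_filterMap]
  apply pvALL_pairwise.imp_of_mem
  intro a b _ _ hab x hx y hy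
  have hxa : x.1 = a := by
    cases hga : d.get? a with
    | none => rw [hga] at hx; cases hx
    | some w => rw [hga] at hx; simp at hx; rw [← hx]
  have hyb : y.1 = b := by
    cases hgb : d.get? b with
    | none => rw [hgb] at hy; cases hy
    | some w => rw [hgb] at hy; simp at hy; rw [← hy]
  rw [hxa, hyb]; exact hab

lemma pvKeysIdx : ORDER_INDEX.keys = pvALL := by decide

-- ===== VERDICT (by name: the statement is the Claim_ definition above) =====
theorem apply_schema_ordering_py_spec : Claim_equal_apply_schema_ordering_py := by
  intro entry _ hpre
  unfold Spec_apply_schema_ordering_py apply_schema_ordering_py apply_schema_ordering_py_alt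
  simp only []
  set d : PySem.Dict String String := PySem.Dict.mk entry with hd
  -- A's three folds plus the final step are one fold over pvALL
  have hAfold : pvStepA d
      (OBJECT_FIELDS.foldl (pvStepA d)
        (ARRAY_FIELDS.foldl (pvStepA d)
          (SCALAR_FIELDS.foldl (pvStepA d) PySem.Dict.empty))) "enrichment_metadata"
      = pvALL.foldl (pvStepA d) PySem.Dict.empty := by
    simp [pvALL, List.foldl_append]
  rw [hAfold]
  have hA : (pvALL.foldl (pvStepA d) PySem.Dict.empty).items = pvGather d pvALL := by
    rw [pvA_fold_items d pvALL PySem.Dict.empty (fun f _ => rfl) (by decide)]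
    rfl
  rw [hA]
  -- B's filter test is membership in pvALL
  have hfilt : entry.filter (fun kv => ORDER_INDEX.contains kv.1)
      = entry.filter (fun p => decide (p.1 ∈ pvALL)) := by
    apply List.filter_congr
    intro p _
    rw [PySem.Dict.contains_eq_decide_mem_keys, pvKeysIdx]
  rw [hfilt]
  -- B's sort returns exactly pvGather d pvALL
  have hperm := pvPerm entry hpre pvALL (by decide)
  have hsorted : PySem.List.sorted (entry.filter (fun p => decide (p.1 ∈ pvALL)))
      (fun kv => ORDER_INDEX.getD kv.1 0) false = pvGather d pvALL :=
    PySem.List.sorted_eq_of_perm_of_pairwise_lt _ _ _ hperm (pvPairwise d)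
  rw [hsorted]
  -- dict() of a nodup-keyed pair list keeps it as-is
  have hnodup : ((pvGather d pvALL).map Prod.fst).Nodup := by
    have hsub : (entry.filter (fun p => decide (p.1 ∈ pvALL))).Sublist entry :=
      List.filter_sublist
    have : ((entry.filter (fun p => decide (p.1 ∈ pvALL))).map Prod.fst).Nodup :=
      hpre.sublist (hsub.map Prod.fst)
    exact ((hperm.map Prod.fst).nodup_iff).mpr this
  have hofl : PySem.Dict.ofList (pvGather d pvALL)
      = (pvGather d pvALL).foldl (fun d p => d.insert p.1 p.2) PySem.Dict.empty := rfl
  rw [hofl, PySem.Dict.items_foldl_insert_fresh (pvGather d pvALL) Prod.fst Prod.snd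
    PySem.Dict.empty (fun a _ => rfl) hnodup]
  simp [PySem.Dict.empty]
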